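-- pv_equiv track=rewrite | github.com/YusufAhmedjeelani/CS421-Repo | p2/project_p2.py | get_dep_categories
-- ===== SOURCE A (Python) =====
-- def get_dep_categories(parsed_input):
--     num_nsubj = 0
--     num_obj = 0
--     num_iobj = 0
--     num_nmod = 0
--     num_amod = 0
--
--     # Write your code here:
--     for line in parsed_input.splitlines():
--         fields = line.strip().split("\t")
--         if len(fields) < 4:
--             continue
--
--         relation = fields[3]
--
--         if relation.startswith("nsubj"):
--             num_nsubj += 1
--         elif relation.startswith("obj") or relation.startswith("dobj"):
--             num_obj += 1
--         elif relation.startswith("iobj"):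
--             num_iobj += 1
--         elif relation.startswith("nmod"):
--             num_nmod += 1
--         elif relation.startswith("amod"):
--             num_amod += 1
--
--     return num_nsubj, num_obj, num_iobj, num_nmod, num_amod
-- ===== SOURCE B (Python) =====
-- def get_dep_categories(parsed_input):
--     def rel(line):
--         fields = line.strip().split("\t")
--         return fields[3] if len(fields) >= 4 else None
--     rels = [r for r in map(rel, parsed_input.splitlines()) if r is not None]
--     num_nsubj = sum(1 for r in rels if r.startswith("nsubj"))
--     num_obj = sum(1 for r in rels if r.startswith("obj") or r.startswith("dobj"))
--     num_iobj = sum(1 for r in rels if r.startswith("iobj"))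
--     num_nmod = sum(1 for r in rels if r.startswith("nmod"))
--     num_amod = sum(1 for r in rels if r.startswith("amod"))
--     return num_nsubj, num_obj, num_iobj, num_nmod, num_amod
-- ===== Notes on version B (the rewrite author's own statement) =====
-- stated objective: alternative
-- what changed: Replaces the single stateful loop with an if/elif precedence chain over five counters by one extraction pass building the list of relation fields followed by five independent predicate counts, correct because the five prefixes are mutually exclusive.
import Mathlib
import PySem

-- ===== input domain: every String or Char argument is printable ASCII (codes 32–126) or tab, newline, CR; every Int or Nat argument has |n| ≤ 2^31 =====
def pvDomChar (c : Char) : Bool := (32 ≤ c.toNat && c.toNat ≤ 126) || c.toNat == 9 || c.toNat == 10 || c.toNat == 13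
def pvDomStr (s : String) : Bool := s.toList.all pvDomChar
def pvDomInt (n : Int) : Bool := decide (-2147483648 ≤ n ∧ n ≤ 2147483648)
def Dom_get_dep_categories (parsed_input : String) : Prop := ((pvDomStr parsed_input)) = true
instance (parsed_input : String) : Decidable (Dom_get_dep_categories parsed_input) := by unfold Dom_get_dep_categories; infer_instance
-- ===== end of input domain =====

-- B replaces A's single stateful loop with an if/elif precedence chain by one extraction pass
-- collecting the relation fields and five independent prefix counts (objective: alternative).

-- ===== PORT A =====
-- the if/elif chain of A's loop body on the relation field
def pvChain (st : Int × Int × Int × Int × Int) (relation : String) : Int × Int × Int × Int × Int :=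
  if PySem.Str.startswith relation "nsubj" then (st.1 + 1, st.2.1, st.2.2.1, st.2.2.2.1, st.2.2.2.2)
  else if PySem.Str.startswith relation "obj" || PySem.Str.startswith relation "dobj" then
    (st.1, st.2.1 + 1, st.2.2.1, st.2.2.2.1, st.2.2.2.2)
  else if PySem.Str.startswith relation "iobj" then (st.1, st.2.1, st.2.2.1 + 1, st.2.2.2.1, st.2.2.2.2)
  else if PySem.Str.startswith relation "nmod" then (st.1, st.2.1, st.2.2.1, st.2.2.2.1 + 1, st.2.2.2.2)
  else if PySem.Str.startswith relation "amod" then (st.1, st.2.1, st.2.2.1, st.2.2.2.1, st.2.2.2.2 + 1)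
  else st

-- one iteration of A's for-loop: parse the line, skip if fewer than 4 fields, else the chain
def pvLineA (st : Int × Int × Int × Int × Int) (line : String) : Int × Int × Int × Int × Int :=
  let fields := (PySem.Str.split? (PySem.Str.strip line) "\t").getD []
  if fields.length < 4 then st
  else pvChain st ((PySem.List.pyGet? fields 3).getD "")

def get_dep_categories (parsed_input : String) : Int × Int × Int × Int × Int :=
  (PySem.Str.splitlines parsed_input).foldl pvLineA (0, 0, 0, 0, 0)

-- ===== PORT B =====
-- B's `rel` helper: the relation field of a line, none if the line has fewer than 4 fields
def pvRel? (line : String) : Option String :=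
  let fields := (PySem.Str.split? (PySem.Str.strip line) "\t").getD []
  if 4 ≤ fields.length then some ((PySem.List.pyGet? fields 3).getD "") else none

def get_dep_categories_alt (parsed_input : String) : Int × Int × Int × Int × Int :=
  let rels := (PySem.Str.splitlines parsed_input).filterMap pvRel?
  ((rels.countP (fun r => PySem.Str.startswith r "nsubj") : Int),
   (rels.countP (fun r => PySem.Str.startswith r "obj" || PySem.Str.startswith r "dobj") : Int),
   (rels.countP (fun r => PySem.Str.startswith r "iobj") : Int),
   (rels.countP (fun r => PySem.Str.startswith r "nmod") : Int),
   (rels.countP (fun r => PySem.Str.startswith r "amod") : Int))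

-- ===== PRECONDITION & SPEC =====
def Spec_get_dep_categories (parsed_input : String) (out : Int × Int × Int × Int × Int) : Prop := out = get_dep_categories_alt parsed_input
instance (parsed_input : String) (out : Int × Int × Int × Int × Int) : Decidable (Spec_get_dep_categories parsed_input out) := by unfold Spec_get_dep_categories; infer_instance

-- ===== CLAIM (what is proved, stated in full; the proofs are below) =====
def Claim_equal_get_dep_categories : Prop := ∀ (parsed_input : String), Dom_get_dep_categories parsed_input → Spec_get_dep_categories parsed_input (get_dep_categories parsed_input)

-- ===== LEMMAS AND PROOFS =====

-- two incomparable prefixes cannot both be prefixes of the same string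
theorem pv_excl (p q r : String) (h : ¬ (p.toList <+: q.toList) ∧ ¬ (q.toList <+: p.toList))
    (hp : PySem.Str.startswith r p = true) : PySem.Str.startswith r q = false := by
  by_contra hq
  rw [Bool.not_eq_false] at hq
  rw [PySem.Str.startswith_eq, PySem.Chars.startswith_iff] at hp hq
  rcases List.prefix_or_prefix_of_prefix hp hq with hc | hc
  · exact h.1 hc
  · exact h.2 hc

-- B's five counts, as a function of the relation list
def pvB (rels : List String) : Int × Int × Int × Int × Int :=
  ((rels.countP (fun r => PySem.Str.startswith r "nsubj") : Int),
   (rels.countP (fun r => PySem.Str.startswith r "obj" || PySem.Str.startswith r "dobj") : Int),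
   (rels.countP (fun r => PySem.Str.startswith r "iobj") : Int),
   (rels.countP (fun r => PySem.Str.startswith r "nmod") : Int),
   (rels.countP (fun r => PySem.Str.startswith r "amod") : Int))

def pvAdd (st t : Int × Int × Int × Int × Int) : Int × Int × Int × Int × Int :=
  (st.1 + t.1, st.2.1 + t.2.1, st.2.2.1 + t.2.2.1, st.2.2.2.1 + t.2.2.2.1, st.2.2.2.2 + t.2.2.2.2)

-- A's chain adds B's one-relation contribution: the five prefixes are mutually exclusive,
-- so the elif precedence does not matter
theorem pvChain_eq (st : Int × Int × Int × Int × Int) (r : String) :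
    pvChain st r = pvAdd st (pvB [r]) := by
  unfold pvChain pvB pvAdd
  simp only [List.countP_cons, List.countP_nil]
  by_cases h1 : PySem.Str.startswith r "nsubj" = true
  · have e2 := pv_excl "nsubj" "obj" r (by decide) h1
    have e2' := pv_excl "nsubj" "dobj" r (by decide) h1
    have e3 := pv_excl "nsubj" "iobj" r (by decide) h1
    have e4 := pv_excl "nsubj" "nmod" r (by decide) h1
    have e5 := pv_excl "nsubj" "amod" r (by decide) h1
    simp only [h1, e2, e2', e3, e4, e5, if_true, Bool.or_self, Bool.false_eq_true, if_false,
      Nat.zero_add, Nat.cast_ofNat, Nat.cast_zero, Nat.cast_one, add_zero]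
  · by_cases h2 : (PySem.Str.startswith r "obj" || PySem.Str.startswith r "dobj") = true
    · have h2' : PySem.Str.startswith r "obj" = true ∨ PySem.Str.startswith r "dobj" = true := by
        simpa using h2
      have e3 : PySem.Str.startswith r "iobj" = false := by
        rcases h2' with h | h
        · exact pv_excl "obj" "iobj" r (by decide) h
        · exact pv_excl "dobj" "iobj" r (by decide) h
      have e4 : PySem.Str.startswith r "nmod" = false := by
        rcases h2' with h | h
        · exact pv_excl "obj" "nmod" r (by decide) h
        · exact pv_excl "dobj" "nmod" r (by decide) h
      have e5 : PySem.Str.startswith r "amod" = false := by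
        rcases h2' with h | h
        · exact pv_excl "obj" "amod" r (by decide) h
        · exact pv_excl "dobj" "amod" r (by decide) h
      have h1' : PySem.Str.startswith r "nsubj" = false := Bool.not_eq_true _ |>.mp h1
      simp only [h1', h2, e3, e4, e5, if_true, Bool.false_eq_true, if_false,
        Nat.zero_add, Nat.cast_zero, Nat.cast_one, add_zero]
    · have h2f : (PySem.Str.startswith r "obj" || PySem.Str.startswith r "dobj") = false :=
        Bool.not_eq_true _ |>.mp h2
      have h1' : PySem.Str.startswith r "nsubj" = false := Bool.not_eq_true _ |>.mp h1
      by_cases h3 : PySem.Str.startswith r "iobj" = true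
      · have e4 := pv_excl "iobj" "nmod" r (by decide) h3
        have e5 := pv_excl "iobj" "amod" r (by decide) h3
        simp only [h1', h2f, h3, e4, e5, if_true, Bool.false_eq_true, if_false,
          Nat.zero_add, Nat.cast_zero, Nat.cast_one, add_zero]
      · have h3' : PySem.Str.startswith r "iobj" = false := Bool.not_eq_true _ |>.mp h3
        by_cases h4 : PySem.Str.startswith r "nmod" = true
        · have e5 := pv_excl "nmod" "amod" r (by decide) h4
          simp only [h1', h2f, h3', h4, e5, if_true, Bool.false_eq_true, if_false,
            Nat.zero_add, Nat.cast_zero, Nat.cast_one, add_zero]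
        · have h4' : PySem.Str.startswith r "nmod" = false := Bool.not_eq_true _ |>.mp h4
          by_cases h5 : PySem.Str.startswith r "amod" = true
          · simp only [h1', h2f, h3', h4', h5, if_true, Bool.false_eq_true, if_false,
              Nat.zero_add, Nat.cast_zero, Nat.cast_one, add_zero]
          · have h5' : PySem.Str.startswith r "amod" = false := Bool.not_eq_true _ |>.mp h5
            simp only [h1', h2f, h3', h4', h5', Bool.false_eq_true, if_false,
              Nat.cast_zero, add_zero]

theorem pvB_cons (r : String) (rels : List String) :
    pvB (r :: rels) = pvAdd (pvB [r]) (pvB rels) := by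
  unfold pvB pvAdd
  simp only [List.countP_cons, List.countP_nil, Nat.zero_add]
  refine Prod.ext ?_ (Prod.ext ?_ (Prod.ext ?_ (Prod.ext ?_ ?_))) <;> simp <;> split_ifs <;>
    push_cast <;> ring

theorem pvAdd_assoc (a b c : Int × Int × Int × Int × Int) :
    pvAdd (pvAdd a b) c = pvAdd a (pvAdd b c) := by
  simp [pvAdd, add_assoc]

theorem pvLineA_eq (st : Int × Int × Int × Int × Int) (line : String) :
    pvLineA st line = pvAdd st (pvB ((pvRel? line).toList)) := by
  unfold pvLineA pvRel?
  by_cases hlen : ((PySem.Str.split? (PySem.Str.strip line) "\t").getD []).length < 4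
  · rw [if_pos hlen, if_neg (by omega)]
    simp [pvB, pvAdd]
  · rw [if_neg hlen, if_pos (by omega)]
    rw [pvChain_eq]
    rfl

theorem pvFold_eq (ls : List String) (st : Int × Int × Int × Int × Int) :
    ls.foldl pvLineA st = pvAdd st (pvB (ls.filterMap pvRel?)) := by
  induction ls generalizing st with
  | nil => simp [pvB, pvAdd]
  | cons l ls ih =>
    rw [List.foldl_cons, ih, pvLineA_eq]
    cases hr : pvRel? l with
    | none => simp [hr, List.filterMap_cons, pvB, pvAdd]
    | some r =>
      simp only [hr, List.filterMap_cons, Option.toList_some]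
      rw [pvB_cons r (List.filterMap pvRel? ls), pvAdd_assoc]

-- ===== VERDICT (by name: the statement is the Claim_ definition above) =====
theorem get_dep_categories_spec : Claim_equal_get_dep_categories := by
  intro s _
  show get_dep_categories s = get_dep_categories_alt s
  unfold get_dep_categories get_dep_categories_alt
  rw [pvFold_eq]
  simp [pvAdd, pvB]
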